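-- pv_equiv track=rewrite | github.com/cz-fish/doom_scoring | lump_generator/Parser.py | _splitByBraces
-- ===== SOURCE A (Python) =====
-- def _splitByBraces(line):
--     pos = 0
--     for i in range(len(line)):
--         if line[i] == '{':
--             yield (line[pos:i], 1)
--             pos = i + 1
--         elif line[i] == '}':
--             yield (line[pos:i], -1)
--             pos = i + 1
--     yield (line[pos:], 0)
-- ===== SOURCE B (Python) =====
-- def _splitByBraces(line):
--     for k, ch in enumerate(line):
--         if ch == '{':
--             yield (line[:k], 1)
--             yield from _splitByBraces(line[k + 1:])
--             return
--         if ch == '}':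
--             yield (line[:k], -1)
--             yield from _splitByBraces(line[k + 1:])
--             return
--     yield (line, 0)
-- ===== Notes on version B (the rewrite author's own statement) =====
-- stated objective: alternative
-- what changed: A scans indices with a mutable segment-start index and slices out each segment at a brace; B instead recursively splits: find the first brace with enumerate, emit (prefix, +/-1), and recurse on the remainder after the brace, emitting (remainder, 0) when no brace remains.
import Mathlib
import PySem

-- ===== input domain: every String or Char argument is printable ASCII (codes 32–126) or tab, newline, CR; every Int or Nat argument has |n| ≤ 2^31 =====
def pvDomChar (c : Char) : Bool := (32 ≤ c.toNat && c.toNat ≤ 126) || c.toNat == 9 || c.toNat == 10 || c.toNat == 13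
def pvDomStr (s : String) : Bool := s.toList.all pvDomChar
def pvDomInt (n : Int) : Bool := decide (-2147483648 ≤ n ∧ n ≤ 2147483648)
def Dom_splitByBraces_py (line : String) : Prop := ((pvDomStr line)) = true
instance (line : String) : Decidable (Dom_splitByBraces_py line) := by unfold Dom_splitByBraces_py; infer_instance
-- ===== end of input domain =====

-- B replaces A's index loop with pos-bookkeeping by a recursive split at the first brace (enumerate, slice, recurse); objective: alternative decomposition, same cost.

-- ===== PORT A =====
-- A's for-loop over range(len(line)) with the mutable 'pos', as recursion on the index i.
def splitByBracesA_go (cs : List Char) (pos i : Nat) : List (String × Int) :=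
  if h : i < cs.length then
    if cs[i] = '{' then
      (String.ofList (PySem.Chars.slice cs (some (pos : Int)) (some (i : Int))), 1)
        :: splitByBracesA_go cs (i + 1) (i + 1)
    else if cs[i] = '}' then
      (String.ofList (PySem.Chars.slice cs (some (pos : Int)) (some (i : Int))), -1)
        :: splitByBracesA_go cs (i + 1) (i + 1)
    else
      splitByBracesA_go cs pos (i + 1)
  else
    [(String.ofList (PySem.Chars.slice cs (some (pos : Int)) none), 0)]
termination_by cs.length - i

def splitByBraces_py (line : String) : List (String × Int) :=
  splitByBracesA_go line.toList 0 0

-- ===== PORT B =====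
-- B's 'for k, ch in enumerate(line)' search for the first brace (loop body only scans; the yields happen on the hit).
def pvFirstBrace : List Char → Nat → Option (Nat × Char)
  | [], _ => none
  | c :: t, k =>
    if c = '{' then some (k, c)
    else if c = '}' then some (k, c)
    else pvFirstBrace t (k + 1)

-- needed by the port's decreasing_by
lemma pvFirstBrace_lt (cs : List Char) (k j : Nat) (c : Char)
    (h : pvFirstBrace cs k = some (j, c)) : j < k + cs.length := by
  induction cs generalizing k with
  | nil => simp [pvFirstBrace] at h
  | cons a t ih =>
    rw [pvFirstBrace] at h
    split at h
    · cases h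
      simp only [List.length_cons]
      omega
    · split at h
      · cases h
        simp only [List.length_cons]
        omega
      · have := ih (k + 1) h
        simp only [List.length_cons]
        omega

-- B: emit (line[:k], ±1) at the first brace and recurse on line[k+1:]; no brace → (line, 0).
-- line[:k] and line[k+1:] are exactly List.take k / List.drop (k+1) (PySem.List.slice_to_natCast / slice_from_natCast).
def splitByBracesB_go (cs : List Char) : List (String × Int) :=
  match hfb : pvFirstBrace cs 0 with
  | none => [(String.ofList cs, 0)]
  | some (j, c) =>
    (String.ofList (cs.take j), if c = '{' then 1 else -1)
      :: splitByBracesB_go (cs.drop (j + 1))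
termination_by cs.length
decreasing_by
  have := pvFirstBrace_lt cs 0 j c hfb
  simp; omega

def splitByBraces_py_alt (line : String) : List (String × Int) :=
  splitByBracesB_go line.toList

-- ===== PRECONDITION & SPEC =====
def Spec_splitByBraces_py (line : String) (out : List (String × Int)) : Prop := out = splitByBraces_py_alt line
instance (line : String) (out : List (String × Int)) : Decidable (Spec_splitByBraces_py line out) := by unfold Spec_splitByBraces_py; infer_instance

-- ===== CLAIM (what is proved, stated in full; the proofs are below) =====
def Claim_equal_splitByBraces_py : Prop := ∀ (line : String), Dom_splitByBraces_py line → Spec_splitByBraces_py line (splitByBraces_py line)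

-- ===== LEMMAS AND PROOFS =====

-- prepend a pending text segment onto the first emitted pair
def pvPrepend (p : List Char) : List (String × Int) → List (String × Int)
  | [] => []
  | (s, m) :: r => (String.ofList (p ++ s.toList), m) :: r

lemma pvPrepend_nil (l : List (String × Int)) : pvPrepend [] l = l := by
  cases l with
  | nil => rfl
  | cons h r => cases h; simp [pvPrepend]

lemma pvPrepend_pvPrepend (a b : List Char) (l : List (String × Int)) :
    pvPrepend a (pvPrepend b l) = pvPrepend (a ++ b) l := by
  cases l with
  | nil => rfl
  | cons h r => cases h; simp [pvPrepend]

lemma pvFirstBrace_shift (t : List Char) (k : Nat) :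
    pvFirstBrace t (k + 1) = Option.map (fun p => (p.1 + 1, p.2)) (pvFirstBrace t k) := by
  induction t generalizing k with
  | nil => rfl
  | cons a s ih =>
    by_cases h1 : a = '{' <;> by_cases h2 : a = '}' <;>
      simp [pvFirstBrace, h1, h2, ih]

lemma splitB_cons_lbrace (t : List Char) :
    splitByBracesB_go ('{' :: t) = (String.ofList [], 1) :: splitByBracesB_go t := by
  rw [splitByBracesB_go]
  simp [pvFirstBrace]

lemma splitB_cons_rbrace (t : List Char) :
    splitByBracesB_go ('}' :: t) = (String.ofList [], -1) :: splitByBracesB_go t := by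
  rw [splitByBracesB_go]
  simp [pvFirstBrace]

lemma splitB_none (cs : List Char) (h : pvFirstBrace cs 0 = none) :
    splitByBracesB_go cs = [(String.ofList cs, 0)] := by
  rw [splitByBracesB_go]
  split
  · rfl
  · rename_i j c heq
    rw [h] at heq
    cases heq

lemma splitB_some (cs : List Char) (j : Nat) (c : Char) (h : pvFirstBrace cs 0 = some (j, c)) :
    splitByBracesB_go cs
      = (String.ofList (cs.take j), if c = '{' then 1 else -1)
          :: splitByBracesB_go (cs.drop (j + 1)) := by
  rw [splitByBracesB_go]
  split
  · rename_i heq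
    rw [h] at heq
    cases heq
  · rename_i j' c' heq
    rw [h] at heq
    cases heq
    rfl

lemma splitB_cons_other (c : Char) (t : List Char) (h1 : c ≠ '{') (h2 : c ≠ '}') :
    splitByBracesB_go (c :: t) = pvPrepend [c] (splitByBracesB_go t) := by
  cases hfb : pvFirstBrace t 0 with
  | none =>
    have hc : pvFirstBrace (c :: t) 0 = none := by
      simp [pvFirstBrace, h1, h2, pvFirstBrace_shift t 0, hfb]
    rw [splitB_none _ hc, splitB_none _ hfb]
    simp [pvPrepend]
  | some p =>
    cases p with
    | mk j d =>
      have hc : pvFirstBrace (c :: t) 0 = some (j + 1, d) := by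
        simp [pvFirstBrace, h1, h2, pvFirstBrace_shift t 0, hfb]
      rw [splitB_some _ _ _ hc, splitB_some _ _ _ hfb]
      simp [pvPrepend]

lemma goA_eq (cs : List Char) :
    ∀ n i pos, cs.length - i = n → pos ≤ i → i ≤ cs.length →
      splitByBracesA_go cs pos i
        = pvPrepend ((cs.drop pos).take (i - pos)) (splitByBracesB_go (cs.drop i)) := by
  intro n
  induction n using Nat.strong_induction_on with
  | _ n IH =>
    intro i pos hn h1 h2
    rw [splitByBracesA_go]
    by_cases hi : i < cs.length
    · have hdrop : cs.drop i = cs[i] :: cs.drop (i + 1) := (List.getElem_cons_drop hi).symm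
      have hIH := IH (cs.length - (i + 1)) (by omega) (i + 1) (i + 1) rfl (le_refl _) (by omega)
      have hIH2 := IH (cs.length - (i + 1)) (by omega) (i + 1) pos rfl (by omega) (by omega)
      have hslice : PySem.Chars.slice cs (some (pos : Int)) (some (i : Int))
          = (cs.drop pos).take (i - pos) := by
        simp [PySem.List.slice_natCast]
      by_cases hl : cs[i] = '{'
      · simp only [hi, dif_pos, hl, if_pos, hslice]
        rw [hIH, Nat.sub_self, List.take_zero, pvPrepend_nil]
        rw [hdrop, hl, splitB_cons_lbrace]
        simp [pvPrepend]
      · by_cases hr : cs[i] = '}'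
        · simp only [hi, dif_pos, hr, if_pos, hslice]
          rw [hIH, Nat.sub_self, List.take_zero, pvPrepend_nil]
          rw [hdrop, hr, splitB_cons_rbrace]
          simp [pvPrepend]
        · simp only [hi, dif_pos, hl, hr, if_false]
          rw [hIH2]
          rw [hdrop, splitB_cons_other cs[i] _ hl hr, pvPrepend_pvPrepend]
          have htake : (cs.drop pos).take (i - pos) ++ [cs[i]]
              = (cs.drop pos).take (i + 1 - pos) := by
            have hlt : i - pos < (cs.drop pos).length := by simp [List.length_drop]; omega
            have : (cs.drop pos)[i - pos] = cs[i] := by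
              rw [List.getElem_drop]
              congr 1; omega
            rw [show i + 1 - pos = (i - pos) + 1 by omega, List.take_add_one]
            simp [List.getElem?_eq_getElem hlt, this]
          rw [htake]
    · have hieq : i = cs.length := by omega
      simp only [hi, dif_neg, not_false_iff]
      have hslice : PySem.Chars.slice cs (some (pos : Int)) none = cs.drop pos := by
        simp [PySem.List.slice_from_natCast]
      rw [hslice, hieq, List.drop_length]
      rw [splitByBracesB_go]
      simp [pvFirstBrace, pvPrepend]
      rw [List.take_of_length_le (by simp [List.length_drop])]

-- ===== VERDICT (by name: the statement is the Claim_ definition above) =====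
theorem splitByBraces_py_spec : Claim_equal_splitByBraces_py := by
  intro line _
  unfold Spec_splitByBraces_py splitByBraces_py splitByBraces_py_alt
  rw [goA_eq line.toList (line.toList.length) 0 0 (by omega) (le_refl _) (by omega)]
  simp [pvPrepend_nil]
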